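-- pv_equiv track=rewrite | github.com/AlejandroNav/tutoriales-python | tranlate.py | traducir
-- ===== SOURCE A (Python) =====
-- def traducir(frase):
--     resultado = " "
--     for letra in frase:
--         if letra.lower() in "pbjvfmnxzys":
--             if letra.isupper():
--                 resultado = resultado + "F"
--             else:
--                 resultado = resultado + "f"
--         else:
--             resultado = resultado + letra
--     return resultado
-- ===== SOURCE B (Python) =====
-- # B: staged whole-string passes — one replace pass per target letter (lower->f, upper->F),
-- # then prepend the leading space; instead of A's per-character branch loop.
-- def traducir(frase):
--     out = frase
--     for low in "pbjvfmnxzys":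
--         out = out.replace(low, "f").replace(low.upper(), "F")
--     return " " + out
-- ===== Notes on version B (the rewrite author's own statement) =====
-- stated objective: faster
-- what changed: Replaced the per-character interpreted loop (lower(), membership test, isupper() branch, repeated concatenation) with 22 staged whole-string str.replace passes (one per target letter and case) plus a single prepend of the seed space; the C-level passes avoid per-char Python bytecode, and correctness rests on the outputs f/F being fixed points of every later pass.
import Mathlib
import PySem

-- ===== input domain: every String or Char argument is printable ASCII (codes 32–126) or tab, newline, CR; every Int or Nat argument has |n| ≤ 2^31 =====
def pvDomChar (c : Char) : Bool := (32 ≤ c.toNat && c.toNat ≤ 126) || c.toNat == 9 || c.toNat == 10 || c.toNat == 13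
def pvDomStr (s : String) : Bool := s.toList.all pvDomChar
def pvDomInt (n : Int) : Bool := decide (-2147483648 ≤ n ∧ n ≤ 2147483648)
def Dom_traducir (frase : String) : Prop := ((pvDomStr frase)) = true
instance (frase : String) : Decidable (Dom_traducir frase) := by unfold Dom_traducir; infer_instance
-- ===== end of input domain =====

-- B replaces the per-character branch loop by 22 staged whole-string replace passes (alternative decomposition).

-- ===== PORT A =====
def traducir (frase : String) : String :=
  String.ofList (frase.toList.foldl (fun resultado letra =>
    if PySem.Chars.isIn [PySem.Chars.lowerChar letra] "pbjvfmnxzys".toList then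
      if PySem.Chars.isupper letra then resultado ++ ['F'] else resultado ++ ['f']
    else resultado ++ [letra]) [' '])

-- ===== PORT B =====
def traducir_alt (frase : String) : String :=
  String.ofList (' ' :: ("pbjvfmnxzys".toList.foldl (fun out low =>
    PySem.Chars.replace (PySem.Chars.replace out [low] ['f'])
      [PySem.Chars.upperChar low] ['F']) frase.toList))

-- ===== PRECONDITION & SPEC =====
def Spec_traducir (frase : String) (out : String) : Prop := out = traducir_alt frase
instance (frase : String) (out : String) : Decidable (Spec_traducir frase out) := by unfold Spec_traducir; infer_instance

-- ===== CLAIM (what is proved, stated in full; the proofs are below) =====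
def Claim_equal_traducir : Prop := ∀ (frase : String), Dom_traducir frase → Spec_traducir frase (traducir frase)

-- ===== LEMMAS AND PROOFS =====

-- replace.go with a single-char pattern is a pointwise substitution
theorem pv_go_single (a b : Char) (l : List Char) (fuel : Nat) (acc : List Char)
    (h : l.length ≤ fuel) :
    PySem.Chars.replace.go [a] [b] fuel l acc
      = acc.reverse ++ l.map (fun c => if c == a then b else c) := by
  induction l generalizing fuel acc with
  | nil => cases fuel <;> simp [PySem.Chars.replace.go]
  | cons c t ih =>
    cases fuel with
    | zero => simp at h
    | succ fuel =>
      simp only [List.length_cons, Nat.succ_le_succ_iff] at h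
      rw [PySem.Chars.replace.go]
      by_cases hc : c = a
      · subst hc
        simp only [List.isPrefixOf, BEq.rfl, Bool.true_and,
          if_pos, List.length_cons, List.length_nil, List.drop_succ_cons, List.drop_zero]
        rw [ih _ _ h]
        simp
      · have : ([a].isPrefixOf (c :: t)) = false := by
          simp [List.isPrefixOf]
          intro hh; exact absurd hh.symm hc
        rw [this]
        simp only [Bool.false_eq_true, if_false]
        rw [ih _ _ h]
        simp [hc]

-- replace with a single-char pattern = map of a substitution
theorem pv_replace_single (a b : Char) (l : List Char) :
    PySem.Chars.replace l [a] [b] = l.map (fun c => if c == a then b else c) := by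
  rw [PySem.Chars.replace]
  simp only [List.isEmpty_cons, Bool.false_eq_true, if_false]
  exact pv_go_single a b l l.length [] (le_refl _)

-- the per-character substitution performed by one letter's pair of passes
def pvStepSub (low c : Char) : Char :=
  if (if c == low then 'f' else c) == PySem.Chars.upperChar low then 'F'
  else if c == low then 'f' else c

-- folding whole-list passes = mapping the composed per-character substitution
theorem pv_fold_passes (letters l : List Char) :
    letters.foldl (fun out low =>
      PySem.Chars.replace (PySem.Chars.replace out [low] ['f'])
        [PySem.Chars.upperChar low] ['F']) l
      = l.map (fun c => letters.foldl (fun c low => pvStepSub low c) c) := by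
  induction letters generalizing l with
  | nil => simp
  | cons low rest ih =>
    simp only [List.foldl_cons]
    rw [pv_replace_single, pv_replace_single, List.map_map, ih, List.map_map]
    rfl

-- pointwise agreement of A's branch with the composed substitution, on the domain
theorem pv_char_eq (c : Char) (hc : pvDomChar c = true) :
    (if PySem.Chars.isIn [PySem.Chars.lowerChar c] "pbjvfmnxzys".toList then
      (if PySem.Chars.isupper c then 'F' else 'f') else c)
    = "pbjvfmnxzys".toList.foldl (fun c low => pvStepSub low c) c := by
  have hval : c = Char.ofNat c.toNat := (Char.ofNat_toNat c).symm
  have hlt : c.toNat < 127 := by simp [pvDomChar] at hc; omega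
  rw [hval]
  generalize c.toNat = n at hlt
  interval_cases n <;> decide

-- A's accumulator loop produces the seed followed by the per-character image
theorem pv_fold_A (l : List Char) (hl : l.all pvDomChar = true) (acc : List Char) :
    l.foldl (fun resultado letra =>
      if PySem.Chars.isIn [PySem.Chars.lowerChar letra] "pbjvfmnxzys".toList then
        if PySem.Chars.isupper letra then resultado ++ ['F'] else resultado ++ ['f']
      else resultado ++ [letra]) acc
    = acc ++ l.map (fun c => "pbjvfmnxzys".toList.foldl (fun c low => pvStepSub low c) c) := by
  induction l generalizing acc with
  | nil => simp
  | cons c cs ih =>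
    simp only [List.all_cons, Bool.and_eq_true] at hl
    have hstep := pv_char_eq c hl.1
    simp only [List.foldl_cons, List.map_cons]
    rw [ih hl.2, ← hstep]
    split_ifs <;> simp

-- ===== VERDICT (by name: the statement is the Claim_ definition above) =====
theorem traducir_spec : Claim_equal_traducir := by
  unfold Claim_equal_traducir
  intro frase hdom
  unfold Spec_traducir traducir traducir_alt Dom_traducir pvDomStr at *
  rw [pv_fold_A frase.toList hdom [' '], pv_fold_passes]
  rfl
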